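-- pv_equiv track=rewrite | github.com/YaroslavAnanich/AOIS | lab7/Main.py | perform_negation_disjunction_and_paste
-- ===== SOURCE A (Python) =====
-- def perform_negation_disjunction_and_paste(matrix, index1, index2, target_column_index):
--     word1 = read_word_by_index(matrix, index1)
--     word2 = read_word_by_index(matrix, index2)
--
--     result_word = ""
--     for i in range(len(word1)):
--         result_word += str(int(not int(word1[i]) or int(word2[i])))
--
--     matrix = write_word_to_column(matrix, result_word, target_column_index)
--
--     return matrix
--
-- def read_word_by_index(matrix, column_index):
--     word = ""
--     for row_index in range(len(matrix)):
--         if row_index + column_index < len(matrix):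
--             word += str(matrix[row_index + column_index][column_index])
--         else:
--             word += str(matrix[row_index + column_index - len(matrix)][column_index])
--     return word
--
-- def write_word_to_column(matrix, word, column_index):
--     for row_index in range(len(matrix)):
--         if row_index + column_index < len(matrix):
--             matrix[row_index + column_index][column_index] = int(word[row_index])
--         else:
--             matrix[row_index + column_index - len(matrix)][column_index] = int(word[row_index])
--     return matrix
-- ===== SOURCE B (Python) =====
-- def perform_negation_disjunction_and_paste(matrix, index1, index2, target_column_index):
--     # One fused in-place pass over the rows: no word strings, no helper passes.
--     # Like A, this mutates `matrix` in place and returns it.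
--     n = len(matrix)
--     for i in range(n):
--         r1 = i + index1 if i + index1 < n else i + index1 - n
--         r2 = i + index2 if i + index2 < n else i + index2 - n
--         bit = int(not matrix[r1][index1] or matrix[r2][index2])
--         rt = i + target_column_index if i + target_column_index < n else i + target_column_index - n
--         matrix[rt][target_column_index] = bit
--     return matrix
-- ===== Notes on version B (the rewrite author's own statement) =====
-- stated objective: simpler
-- what changed: B fuses A's three passes (read two diagonal words as strings via read_word_by_index, combine them into a result string, write it back via write_word_to_column) into a single in-place loop over the rows that computes each bit directly from the integer entries, with no word strings and no str()/int() round-trip.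
-- outside the precondition, e.g. on perform_negation_disjunction_and_paste([[12]], 0, 0, 0): A returns [[1]], B returns [[12]]; on perform_negation_disjunction_and_paste([[0], [0]], -1, 0, 0): A returns [[1], [1]], B returns [[1], [0]]; on perform_negation_disjunction_and_paste([[10, 1], [1, 0]], 0, 1, 0): A raises IndexError, B returns [[0, 1], [1, 0]]
import Mathlib
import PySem

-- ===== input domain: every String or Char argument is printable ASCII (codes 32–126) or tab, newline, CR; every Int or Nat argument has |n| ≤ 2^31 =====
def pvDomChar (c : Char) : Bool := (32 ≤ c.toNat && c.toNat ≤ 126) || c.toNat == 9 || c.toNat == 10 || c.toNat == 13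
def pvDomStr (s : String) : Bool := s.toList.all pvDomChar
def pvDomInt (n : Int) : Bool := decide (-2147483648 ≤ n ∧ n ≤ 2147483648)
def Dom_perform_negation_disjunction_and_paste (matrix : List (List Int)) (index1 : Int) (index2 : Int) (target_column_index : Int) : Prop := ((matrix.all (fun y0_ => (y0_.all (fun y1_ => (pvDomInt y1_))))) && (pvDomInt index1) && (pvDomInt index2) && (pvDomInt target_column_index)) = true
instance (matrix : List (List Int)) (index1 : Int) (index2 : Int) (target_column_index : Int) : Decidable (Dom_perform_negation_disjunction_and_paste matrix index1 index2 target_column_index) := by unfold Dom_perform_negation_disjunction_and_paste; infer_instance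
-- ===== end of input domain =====

-- B fuses A's three passes (read two diagonal words as strings, combine, write back) into one
-- in-place loop on the ints, with no string round-trip (objective: simpler). Both A and B mutate
-- `matrix` in place in Python; the equivalence proved here is about the return value.

-- ===== PORT A =====
-- Python strings are ported as List Char (PySem.Chars side); str(x) is PySem.Int.toChars,
-- int(one-char string) is PySem.Int.ofChars? on the singleton list.
def pvReadWord (matrix : List (List Int)) (column_index : Int) : List Char :=
  (List.range matrix.length).foldl (fun (word : List Char) (row_index : Nat) =>
    if (row_index : Int) + column_index < (matrix.length : Int) then
      word ++ PySem.Int.toChars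
        (PySem.List.pyGetD (PySem.List.pyGetD matrix ((row_index : Int) + column_index) []) column_index 0)
    else
      word ++ PySem.Int.toChars
        (PySem.List.pyGetD (PySem.List.pyGetD matrix ((row_index : Int) + column_index - (matrix.length : Int)) []) column_index 0)) []

def pvWriteWord (matrix : List (List Int)) (word : List Char) (column_index : Int) : List (List Int) :=
  (List.range matrix.length).foldl (fun (m : List (List Int)) (row_index : Nat) =>
    let v : Int := (PySem.Int.ofChars? [PySem.List.pyGetD word (row_index : Int) ' ']).getD 0
    if (row_index : Int) + column_index < (matrix.length : Int) then
      PySem.List.pySetD m ((row_index : Int) + column_index)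
        (PySem.List.pySetD (PySem.List.pyGetD m ((row_index : Int) + column_index) []) column_index v)
    else
      PySem.List.pySetD m ((row_index : Int) + column_index - (matrix.length : Int))
        (PySem.List.pySetD (PySem.List.pyGetD m ((row_index : Int) + column_index - (matrix.length : Int)) []) column_index v)) matrix

def perform_negation_disjunction_and_paste (matrix : List (List Int)) (index1 : Int) (index2 : Int) (target_column_index : Int) : List (List Int) :=
  let word1 := pvReadWord matrix index1
  let word2 := pvReadWord matrix index2
  let result_word := (List.range word1.length).foldl (fun (rw : List Char) (i : Nat) =>
    let b1 : Int := (PySem.Int.ofChars? [PySem.List.pyGetD word1 (i : Int) ' ']).getD 0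
    let b2 : Int := (PySem.Int.ofChars? [PySem.List.pyGetD word2 (i : Int) ' ']).getD 0
    -- int(not b1 or b2): `not b1` true gives int(True) = 1, else the value int(b2) = b2
    rw ++ PySem.Int.toChars (if b1 = 0 then 1 else b2)) []
  pvWriteWord matrix result_word target_column_index

-- ===== PORT B =====
def perform_negation_disjunction_and_paste_alt (matrix : List (List Int)) (index1 : Int) (index2 : Int) (target_column_index : Int) : List (List Int) :=
  (List.range matrix.length).foldl (fun (m : List (List Int)) (i : Nat) =>
    let r1 : Int := if (i : Int) + index1 < (matrix.length : Int) then (i : Int) + index1 else (i : Int) + index1 - (matrix.length : Int)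
    let r2 : Int := if (i : Int) + index2 < (matrix.length : Int) then (i : Int) + index2 else (i : Int) + index2 - (matrix.length : Int)
    let b1 : Int := PySem.List.pyGetD (PySem.List.pyGetD m r1 []) index1 0
    let b2 : Int := PySem.List.pyGetD (PySem.List.pyGetD m r2 []) index2 0
    -- int(not b1 or b2): `not b1` true gives int(True) = 1, else the value int(b2) = b2
    let bit : Int := if b1 = 0 then 1 else b2
    let rt : Int := if (i : Int) + target_column_index < (matrix.length : Int) then (i : Int) + target_column_index else (i : Int) + target_column_index - (matrix.length : Int)
    PySem.List.pySetD m rt (PySem.List.pySetD (PySem.List.pyGetD m rt []) target_column_index bit)) matrix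

-- ===== PRECONDITION & SPEC =====
-- Pre_ restricts to the function's natural domain: a square matrix of single-digit entries 0..9
-- (each entry is then exactly one character of A's diagonal word strings) with the three indices in
-- Python's index range [-n, n) (the empty matrix is allowed).  Outside it A still returns on some
-- inputs (multi-digit entries or ragged rows make the word strings misalign) — accidental values of
-- A's string round-trip that B does not reproduce; see the cited examples.
def Pre_perform_negation_disjunction_and_paste (matrix : List (List Int)) (index1 : Int) (index2 : Int) (target_column_index : Int) : Prop :=
  (∀ row ∈ matrix, row.length = matrix.length ∧ ∀ x ∈ row, 0 ≤ x ∧ x ≤ 9) ∧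
  (matrix = [] ∨
    (-(matrix.length : Int) ≤ index1 ∧ index1 < (matrix.length : Int) ∧
     -(matrix.length : Int) ≤ index2 ∧ index2 < (matrix.length : Int) ∧
     -(matrix.length : Int) ≤ target_column_index ∧ target_column_index < (matrix.length : Int)))
instance (matrix : List (List Int)) (index1 : Int) (index2 : Int) (target_column_index : Int) : Decidable (Pre_perform_negation_disjunction_and_paste matrix index1 index2 target_column_index) := by unfold Pre_perform_negation_disjunction_and_paste; infer_instance

def pvWitness_perform_negation_disjunction_and_paste : List (List Int) × Int × Int × Int := ([[1, 0], [0, 1]], 0, -1, 1)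

def Spec_perform_negation_disjunction_and_paste (matrix : List (List Int)) (index1 : Int) (index2 : Int) (target_column_index : Int) (out : List (List Int)) : Prop := out = perform_negation_disjunction_and_paste_alt matrix index1 index2 target_column_index
instance (matrix : List (List Int)) (index1 : Int) (index2 : Int) (target_column_index : Int) (out : List (List Int)) : Decidable (Spec_perform_negation_disjunction_and_paste matrix index1 index2 target_column_index out) := by unfold Spec_perform_negation_disjunction_and_paste; infer_instance

-- ===== CLAIM (what is proved, stated in full; the proofs are below) =====
def Claim_equal_perform_negation_disjunction_and_paste : Prop := ∀ (matrix : List (List Int)) (index1 : Int) (index2 : Int) (target_column_index : Int), Dom_perform_negation_disjunction_and_paste matrix index1 index2 target_column_index → Pre_perform_negation_disjunction_and_paste matrix index1 index2 target_column_index → Spec_perform_negation_disjunction_and_paste matrix index1 index2 target_column_index (perform_negation_disjunction_and_paste matrix index1 index2 target_column_index)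

-- ===== LEMMAS AND PROOFS =====

-- Normalised (nonnegative) column index: Python's column index c as a Nat, for -n ≤ c < n.
def pvCol (n : Nat) (c : Int) : Nat := (c % (n : Int)).toNat
-- Normalised wrapped row index of loop step i for column c.
def pvRow (n : Nat) (i : Nat) (c : Int) : Nat := (i + pvCol n c) % n
-- Cell (r, c) of a matrix, via getD.
def pvCell (m : List (List Int)) (r c : Nat) : Int := (m.getD r []).getD c 0

-- The bit A computes at step i, read off the ORIGINAL matrix.
def pvBit (matrix : List (List Int)) (i1 i2 : Int) (i : Nat) : Int :=
  if pvCell matrix (pvRow matrix.length i i1) (pvCol matrix.length i1) = 0 then 1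
  else pvCell matrix (pvRow matrix.length i i2) (pvCol matrix.length i2)

-- Common normal form of both ports: write bit i into cell (pvRow i t, pvCol t), i = 0..n-1.
def pvPaste (matrix : List (List Int)) (bit : Nat → Int) (t : Int) : List (List Int) :=
  (List.range matrix.length).foldl (fun (m : List (List Int)) (i : Nat) =>
    m.set (pvRow matrix.length i t)
      ((m.getD (pvRow matrix.length i t) []).set (pvCol matrix.length t) (bit i))) matrix

lemma pyGetD_wrap {α : Type} (xs : List α) (d : α) (j : Int)
    (h1 : -(xs.length : Int) ≤ j) (h2 : j < (xs.length : Int)) :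
    PySem.List.pyGetD xs j d = xs.getD ((j % (xs.length : Int)).toNat) d := by
  rcases (by omega : 0 ≤ j ∨ j < 0) with h0 | h0
  · rw [PySem.List.pyGetD_eq_getElem xs d h0 h2, Int.emod_eq_of_lt h0 h2,
      List.getD_eq_getElem xs d (by omega)]
  · have hk : j = -(((-j).toNat : Nat) : Int) := by omega
    rw [hk, PySem.List.pyGetD_neg_natCast xs _ d (by omega) (by omega)]
    have he : j % (xs.length : Int) = j + xs.length := by
      have : j % (xs.length : Int) = (j + xs.length * 1) % xs.length := by
        rw [Int.add_mul_emod_self_left]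
      simpa using this.trans (Int.emod_eq_of_lt (by omega) (by omega))
    rw [← hk, he, List.getD_eq_getElem xs d (by omega)]
    congr 1
    omega

lemma pyIdx?_eq (n : Nat) (j : Int) (h1 : -(n : Int) ≤ j) (h2 : j < (n : Int)) :
    PySem.List.pyIdx? n j = some ((j % (n : Int)).toNat) := by
  have he : j < 0 → j % (n : Int) = j + n := by
    intro h0
    have : j % (n : Int) = (j + n * 1) % n := by rw [Int.add_mul_emod_self_left]
    simpa using this.trans (Int.emod_eq_of_lt (by omega) (by omega))
  unfold PySem.List.pyIdx?
  split_ifs with ha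
  · rw [Int.emod_eq_of_lt ha h2]
  · rw [he (by omega)]
    congr 1
    omega

lemma pySetD_wrap {α : Type} (xs : List α) (v : α) (j : Int)
    (h1 : -(xs.length : Int) ≤ j) (h2 : j < (xs.length : Int)) :
    PySem.List.pySetD xs j v = xs.set ((j % (xs.length : Int)).toNat) v := by
  rcases (by omega : 0 ≤ j ∨ j < 0) with h0 | h0
  · rw [PySem.List.pySetD_of_nonneg xs v h0, Int.emod_eq_of_lt h0 h2]
  · simp [PySem.List.pySetD, PySem.List.pySet?, pyIdx?_eq xs.length j h1 h2]

lemma pvCol_lt (n : Nat) (hn : 0 < n) (c : Int) : pvCol n c < n := by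
  unfold pvCol
  have h1 : 0 ≤ c % (n : Int) := Int.emod_nonneg c (by omega)
  have h2 : c % (n : Int) < n := Int.emod_lt_of_pos c (by omega)
  omega

lemma pvRow_lt (n : Nat) (hn : 0 < n) (i : Nat) (c : Int) : pvRow n i c < n :=
  Nat.mod_lt _ hn

-- the central wrap arithmetic: ((i + c) mod n).toNat is pvRow n i c
lemma addmod_toNat (n : Nat) (hn : 0 < n) (i : Nat) (hi : i < n) (c : Int) :
    (((i : Int) + c) % (n : Int)).toNat = pvRow n i c := by
  unfold pvRow pvCol
  have h1 : 0 ≤ c % (n : Int) := Int.emod_nonneg c (by omega)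
  have h2 : c % (n : Int) < n := Int.emod_lt_of_pos c (by omega)
  have key : ((i : Int) + c) % (n : Int) = ((i : Int) + c % n) % n := by
    conv_lhs => rw [show (i : Int) + c = ((i : Int) + c % n) + (n : Int) * (c / n) by
      have := Int.mul_ediv_add_emod c (n : Int); omega]
    rw [Int.add_mul_emod_self_left]
  rw [key]
  by_cases hlt : (i : Int) + c % n < n
  · rw [Int.emod_eq_of_lt (by omega) hlt]
    have : (i + (c % (n : Int)).toNat) % n = i + (c % (n : Int)).toNat :=
      Nat.mod_eq_of_lt (by omega)
    omega
  · have hsub : ((i : Int) + c % n) % n = (i : Int) + c % n - n := by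
      conv_lhs => rw [show (i : Int) + c % n = ((i : Int) + c % n - n) + (n : Int) * 1 by ring]
      rw [Int.add_mul_emod_self_left]
      exact Int.emod_eq_of_lt (by omega) (by omega)
    rw [hsub]
    have : (i + (c % (n : Int)).toNat) % n = i + (c % (n : Int)).toNat - n := by
      rw [Nat.mod_eq_sub_mod (by omega)]
      exact Nat.mod_eq_of_lt (by omega)
    omega

lemma submod (n i c : Int) : (i + c - n) % n = (i + c) % n := by
  rw [show i + c - n = (i + c) + n * (-1) by ring, Int.add_mul_emod_self_left]

lemma pvRow_inj (n : Nat) (hn : 0 < n) (t : Int) (i j : Nat) (hi : i < n) (hj : j < n)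
    (h : pvRow n i t = pvRow n j t) : i = j := by
  unfold pvRow at h
  have hu : pvCol n t < n := pvCol_lt n hn t
  have m2 : ∀ x : Nat, x < 2 * n → x % n = if x < n then x else x - n := by
    intro x hx
    split_ifs with hlt
    · exact Nat.mod_eq_of_lt hlt
    · rw [Nat.mod_eq_sub_mod (by omega)]
      exact Nat.mod_eq_of_lt (by omega)
  rw [m2 _ (by omega), m2 _ (by omega)] at h
  split_ifs at h <;> omega

-- aliasing of columns carries over to the wrapped rows
lemma pvRow_congr (n : Nat) (i : Nat) (c t : Int) (h : pvCol n c = pvCol n t) :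
    pvRow n i c = pvRow n i t := by
  unfold pvRow
  rw [h]

-- reading cell (i, c) through Python's wrapped indexing, on any list m of the right shape
lemma cell_get (m : List (List Int)) (n : Nat) (hm : m.length = n)
    (hrows : ∀ row ∈ m, row.length = n) (hn : 0 < n) (i : Nat) (hi : i < n) (c : Int)
    (hc1 : -(n : Int) ≤ c) (hc2 : c < (n : Int)) :
    PySem.List.pyGetD (PySem.List.pyGetD m
        (if (i : Int) + c < (n : Int) then (i : Int) + c else (i : Int) + c - (n : Int)) []) c 0
      = pvCell m (pvRow n i c) (pvCol n c) := by
  have hb1 : -(n : Int) ≤ (if (i : Int) + c < (n : Int) then (i : Int) + c else (i : Int) + c - (n : Int)) := by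
    split_ifs <;> omega
  have hb2 : (if (i : Int) + c < (n : Int) then (i : Int) + c else (i : Int) + c - (n : Int)) < (n : Int) := by
    split_ifs <;> omega
  have hmod : ((if (i : Int) + c < (n : Int) then (i : Int) + c else (i : Int) + c - (n : Int)) % (n : Int)).toNat
      = pvRow n i c := by
    split_ifs
    · exact addmod_toNat n hn i hi c
    · rw [submod]
      exact addmod_toNat n hn i hi c
  rw [pyGetD_wrap m [] _ (by omega) (by omega), hm, hmod]
  have hrlt : pvRow n i c < m.length := by rw [hm]; exact pvRow_lt n hn i c
  have hrow : m.getD (pvRow n i c) [] ∈ m := by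
    rw [List.getD_eq_getElem m [] hrlt]
    exact List.getElem_mem hrlt
  have hrl : (m.getD (pvRow n i c) []).length = n := hrows _ hrow
  rw [pyGetD_wrap _ 0 c (by omega) (by omega), hrl]
  rfl

-- writing value v into wrapped cell (i, t)
lemma cell_set (m : List (List Int)) (n : Nat) (hm : m.length = n)
    (hrows : ∀ row ∈ m, row.length = n) (hn : 0 < n) (i : Nat) (hi : i < n) (t : Int)
    (ht1 : -(n : Int) ≤ t) (ht2 : t < (n : Int)) (v : Int) :
    PySem.List.pySetD m
        (if (i : Int) + t < (n : Int) then (i : Int) + t else (i : Int) + t - (n : Int))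
        (PySem.List.pySetD (PySem.List.pyGetD m
          (if (i : Int) + t < (n : Int) then (i : Int) + t else (i : Int) + t - (n : Int)) []) t v)
      = m.set (pvRow n i t) ((m.getD (pvRow n i t) []).set (pvCol n t) v) := by
  have hmod : ((if (i : Int) + t < (n : Int) then (i : Int) + t else (i : Int) + t - (n : Int)) % (n : Int)).toNat
      = pvRow n i t := by
    split_ifs
    · exact addmod_toNat n hn i hi t
    · rw [submod]
      exact addmod_toNat n hn i hi t
  have hb1 : -(n : Int) ≤ (if (i : Int) + t < (n : Int) then (i : Int) + t else (i : Int) + t - (n : Int)) := by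
    split_ifs <;> omega
  have hb2 : (if (i : Int) + t < (n : Int) then (i : Int) + t else (i : Int) + t - (n : Int)) < (n : Int) := by
    split_ifs <;> omega
  rw [pyGetD_wrap m [] _ (by omega) (by omega), pySetD_wrap m _ _ (by omega) (by omega), hm, hmod]
  have hrlt : pvRow n i t < m.length := by rw [hm]; exact pvRow_lt n hn i t
  have hrow : m.getD (pvRow n i t) [] ∈ m := by
    rw [List.getD_eq_getElem m [] hrlt]
    exact List.getElem_mem hrlt
  have hrl : (m.getD (pvRow n i t) []).length = n := hrows _ hrow
  rw [pySetD_wrap _ v t (by omega) (by omega), hrl]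
  rfl

-- entries stay single digits
-- (0..9: their str() is a single character)
lemma cell_digit (matrix : List (List Int))
    (hsq : ∀ row ∈ matrix, row.length = matrix.length ∧ ∀ x ∈ row, 0 ≤ x ∧ x ≤ 9)
    (r c : Nat) (hr : r < matrix.length) (hc : c < matrix.length) :
    0 ≤ pvCell matrix r c ∧ pvCell matrix r c ≤ 9 := by
  unfold pvCell
  rw [List.getD_eq_getElem matrix [] hr]
  obtain ⟨hlen, hbin⟩ := hsq _ (List.getElem_mem hr)
  rw [List.getD_eq_getElem _ 0 (by omega)]
  exact hbin _ (List.getElem_mem _)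

-- the single character str(v) of a digit v, and the int()/str() round trip on it
def pvDigitChar (v : Int) : Char := (PySem.Int.toChars v).headD ' '

lemma toChars_digit (v : Int) (h0 : 0 ≤ v) (h9 : v ≤ 9) :
    PySem.Int.toChars v = [pvDigitChar v] := by
  interval_cases v <;> decide

lemma ofChars_digit (v : Int) (h0 : 0 ≤ v) (h9 : v ≤ 9) :
    PySem.Int.ofChars? [pvDigitChar v] = some v := by
  interval_cases v <;> decide

lemma pvBit_digit (matrix : List (List Int)) (i1 i2 : Int)
    (hsq : ∀ row ∈ matrix, row.length = matrix.length ∧ ∀ x ∈ row, 0 ≤ x ∧ x ≤ 9)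
    (hn : 0 < matrix.length) (i : Nat) :
    0 ≤ pvBit matrix i1 i2 i ∧ pvBit matrix i1 i2 i ≤ 9 := by
  unfold pvBit
  split_ifs
  · omega
  · exact cell_digit matrix hsq _ _ (pvRow_lt _ hn _ _) (pvCol_lt _ hn _)

-- a fold congruence that carries an invariant on the accumulator
lemma foldl_congr_inv {α β : Type} (l : List β) (f g : α → β → α) (init : α) (P : α → Prop)
    (hinit : P init) (hstep : ∀ a b, P a → b ∈ l → f a b = g a b ∧ P (g a b)) :
    l.foldl f init = l.foldl g init := by
  induction l generalizing init with
  | nil => rfl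
  | cons x xs ih =>
    obtain ⟨hfg, hP⟩ := hstep init x hinit (by simp)
    simp only [List.foldl_cons, hfg]
    exact ih (g init x) hP (fun a b ha hb => hstep a b ha (by simp [hb]))

-- the shape invariant ("square with side matrix.length") is preserved by pvPaste's step
lemma shape_set (m : List (List Int)) (n : Nat) (hm : m.length = n)
    (hrows : ∀ row ∈ m, row.length = n) (r c : Nat) (hr : r < n) (v : Int) :
    (m.set r ((m.getD r []).set c v)).length = n ∧
    ∀ row ∈ m.set r ((m.getD r []).set c v), row.length = n := by
  refine ⟨by simpa using hm, fun row hrow => ?_⟩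
  rcases List.mem_or_eq_of_mem_set hrow with h | h
  · exact hrows _ h
  · subst h
    have hr' : r < m.length := by omega
    have : m.getD r [] ∈ m := by
      rw [List.getD_eq_getElem m [] hr']
      exact List.getElem_mem hr'
    simpa using hrows _ this

-- a write into cell (r', c') leaves every other cell unchanged
lemma pvCell_write_ne (m : List (List Int)) (r' c' : Nat) (v : Int) (r c : Nat)
    (hne : r ≠ r' ∨ c ≠ c') :
    pvCell (m.set r' ((m.getD r' []).set c' v)) r c = pvCell m r c := by
  unfold pvCell
  unfold List.getD
  rcases (by tauto : r ≠ r' ∨ (r = r' ∧ c ≠ c')) with h | ⟨h1, h2⟩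
  · rw [List.getElem?_set_ne (by omega)]
  · subst h1
    rcases (by omega : r < m.length ∨ m.length ≤ r) with hr | hr
    · rw [List.getElem?_set_self hr, Option.getD_some, List.getElem?_set_ne (show c' ≠ c by omega)]
    · rw [List.set_eq_of_length_le (by omega)]

lemma readWord_eq (matrix : List (List Int)) (c : Int)
    (hsq : ∀ row ∈ matrix, row.length = matrix.length ∧ ∀ x ∈ row, 0 ≤ x ∧ x ≤ 9)
    (hn : 0 < matrix.length) (hc1 : -(matrix.length : Int) ≤ c) (hc2 : c < (matrix.length : Int)) :
    pvReadWord matrix c = (List.range matrix.length).map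
      (fun i => pvDigitChar (pvCell matrix (pvRow matrix.length i c) (pvCol matrix.length c))) := by
  unfold pvReadWord
  rw [PySem.List.foldl_congr_mem' _ _
    (fun word i => word ++ [pvDigitChar (pvCell matrix (pvRow matrix.length i c) (pvCol matrix.length c))]) []
    ?_]
  · rw [PySem.List.foldl_append_singleton_eq_map]
    simp
  · intro i hi acc
    have hi' : i < matrix.length := List.mem_range.mp hi
    have hrows : ∀ row ∈ matrix, row.length = matrix.length := fun row h => (hsq row h).1
    have hcg := cell_get matrix matrix.length rfl hrows hn i hi' c hc1 hc2
    dsimp only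
    rw [← apply_ite (fun j => acc ++ PySem.Int.toChars
      (PySem.List.pyGetD (PySem.List.pyGetD matrix j []) c 0)), hcg]
    obtain ⟨h0, h9⟩ := cell_digit matrix hsq _ _ (pvRow_lt _ hn i c) (pvCol_lt _ hn c)
    rw [toChars_digit _ h0 h9]
lemma writeWord_eq (matrix : List (List Int)) (t : Int) (bit : Nat → Int)
    (hbit : ∀ i, 0 ≤ bit i ∧ bit i ≤ 9)
    (hrows : ∀ row ∈ matrix, row.length = matrix.length)
    (hn : 0 < matrix.length) (ht1 : -(matrix.length : Int) ≤ t) (ht2 : t < (matrix.length : Int)) :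
    pvWriteWord matrix ((List.range matrix.length).map (fun i => pvDigitChar (bit i))) t
      = pvPaste matrix bit t := by
  unfold pvWriteWord pvPaste
  apply foldl_congr_inv _ _ _ _
    (fun m => m.length = matrix.length ∧ ∀ row ∈ m, row.length = matrix.length) ⟨rfl, hrows⟩
  rintro m i ⟨hm, hrowsm⟩ hi
  have hi' : i < matrix.length := List.mem_range.mp hi
  constructor
  · dsimp only
    have hv : (PySem.Int.ofChars? [PySem.List.pyGetD
        ((List.range matrix.length).map (fun i => pvDigitChar (bit i))) (i : Int) ' ']).getD 0 = bit i := by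
      rw [PySem.List.pyGetD_natCast, List.getD_eq_getElem _ _ (by simp [hi'])]
      simp only [List.getElem_map, List.getElem_range]
      rw [ofChars_digit _ (hbit i).1 (hbit i).2]
      rfl
    rw [hv, ← apply_ite (fun j => PySem.List.pySetD m j
      (PySem.List.pySetD (PySem.List.pyGetD m j []) t (bit i)))]
    exact cell_set m matrix.length hm hrowsm hn i hi' t ht1 ht2 (bit i)
  · dsimp only
    exact shape_set m matrix.length hm hrowsm _ _ (pvRow_lt _ hn i t) (bit i)

lemma pvA_norm (matrix : List (List Int)) (i1 i2 t : Int)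
    (hpre : Pre_perform_negation_disjunction_and_paste matrix i1 i2 t) :
    perform_negation_disjunction_and_paste matrix i1 i2 t = pvPaste matrix (pvBit matrix i1 i2) t := by
  obtain ⟨hsq, hdom⟩ := hpre
  rcases hdom with hnil | ⟨h1a, h1b, h2a, h2b, h3a, h3b⟩
  · subst hnil
    rfl
  · have hn : 0 < matrix.length := by omega
    have hrows : ∀ row ∈ matrix, row.length = matrix.length := fun row h => (hsq row h).1
    unfold perform_negation_disjunction_and_paste
    dsimp only
    rw [readWord_eq matrix i1 hsq hn h1a h1b, readWord_eq matrix i2 hsq hn h2a h2b]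
    simp only [List.length_map, List.length_range]
    rw [PySem.List.foldl_congr_mem' _ _
      (fun rw i => rw ++ [pvDigitChar (pvBit matrix i1 i2 i)]) [] ?_]
    · rw [PySem.List.foldl_append_singleton_eq_map, List.nil_append]
      exact writeWord_eq matrix t (pvBit matrix i1 i2)
        (pvBit_digit matrix i1 i2 hsq hn) hrows hn h3a h3b
    · intro i hi acc
      have hi' : i < matrix.length := List.mem_range.mp hi
      dsimp only
      rw [PySem.List.pyGetD_natCast, PySem.List.pyGetD_natCast,
        List.getD_eq_getElem _ _ (by simp [hi']), List.getD_eq_getElem _ _ (by simp [hi'])]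
      simp only [List.getElem_map, List.getElem_range]
      have hb1 := cell_digit matrix hsq _ _ (pvRow_lt _ hn i i1) (pvCol_lt _ hn i1)
      have hb2 := cell_digit matrix hsq _ _ (pvRow_lt _ hn i i2) (pvCol_lt _ hn i2)
      rw [ofChars_digit _ hb1.1 hb1.2, ofChars_digit _ hb2.1 hb2.2]
      have hb : (if pvCell matrix (pvRow matrix.length i i1) (pvCol matrix.length i1) = 0 then (1 : Int)
          else pvCell matrix (pvRow matrix.length i i2) (pvCol matrix.length i2)) = pvBit matrix i1 i2 i := rfl
      rw [Option.getD_some, Option.getD_some, hb,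
        toChars_digit _ (pvBit_digit matrix i1 i2 hsq hn i).1 (pvBit_digit matrix i1 i2 hsq hn i).2]


lemma pvB_stage (matrix : List (List Int)) (i1 i2 t : Int)
    (hsq : ∀ row ∈ matrix, row.length = matrix.length ∧ ∀ x ∈ row, 0 ≤ x ∧ x ≤ 9)
    (hn : 0 < matrix.length)
    (h1a : -(matrix.length : Int) ≤ i1) (h1b : i1 < (matrix.length : Int))
    (h2a : -(matrix.length : Int) ≤ i2) (h2b : i2 < (matrix.length : Int))
    (h3a : -(matrix.length : Int) ≤ t) (h3b : t < (matrix.length : Int)) :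
    ∀ k, k ≤ matrix.length →
      (List.range k).foldl (fun (m : List (List Int)) (i : Nat) =>
        let r1 : Int := if (i : Int) + i1 < (matrix.length : Int) then (i : Int) + i1 else (i : Int) + i1 - (matrix.length : Int)
        let r2 : Int := if (i : Int) + i2 < (matrix.length : Int) then (i : Int) + i2 else (i : Int) + i2 - (matrix.length : Int)
        let b1 : Int := PySem.List.pyGetD (PySem.List.pyGetD m r1 []) i1 0
        let b2 : Int := PySem.List.pyGetD (PySem.List.pyGetD m r2 []) i2 0
        let bit : Int := if b1 = 0 then 1 else b2
        let rt : Int := if (i : Int) + t < (matrix.length : Int) then (i : Int) + t else (i : Int) + t - (matrix.length : Int)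
        PySem.List.pySetD m rt (PySem.List.pySetD (PySem.List.pyGetD m rt []) t bit)) matrix
      = (List.range k).foldl (fun (m : List (List Int)) (i : Nat) =>
          m.set (pvRow matrix.length i t)
            ((m.getD (pvRow matrix.length i t) []).set (pvCol matrix.length t) (pvBit matrix i1 i2 i))) matrix ∧
      ((List.range k).foldl (fun (m : List (List Int)) (i : Nat) =>
          m.set (pvRow matrix.length i t)
            ((m.getD (pvRow matrix.length i t) []).set (pvCol matrix.length t) (pvBit matrix i1 i2 i))) matrix).length = matrix.length ∧
      (∀ row ∈ (List.range k).foldl (fun (m : List (List Int)) (i : Nat) =>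
          m.set (pvRow matrix.length i t)
            ((m.getD (pvRow matrix.length i t) []).set (pvCol matrix.length t) (pvBit matrix i1 i2 i))) matrix, row.length = matrix.length) ∧
      (∀ r c : Nat, r < matrix.length → c < matrix.length →
        (c ≠ pvCol matrix.length t ∨ ∀ j < k, pvRow matrix.length j t ≠ r) →
        pvCell ((List.range k).foldl (fun (m : List (List Int)) (i : Nat) =>
          m.set (pvRow matrix.length i t)
            ((m.getD (pvRow matrix.length i t) []).set (pvCol matrix.length t) (pvBit matrix i1 i2 i))) matrix) r c
          = pvCell matrix r c) := by
  intro k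
  induction k with
  | zero =>
    intro _
    exact ⟨rfl, rfl, fun row h => (hsq row h).1, fun r c _ _ _ => rfl⟩
  | succ k ih =>
    intro hk
    obtain ⟨heq, hlen, hrows', huntouched⟩ := ih (by omega)
    rw [List.range_succ]
    simp only [List.foldl_append, List.foldl_cons, List.foldl_nil]
    rw [heq]
    set mP := (List.range k).foldl (fun (m : List (List Int)) (i : Nat) =>
          m.set (pvRow matrix.length i t)
            ((m.getD (pvRow matrix.length i t) []).set (pvCol matrix.length t) (pvBit matrix i1 i2 i))) matrix with hmP
    have hget1 : PySem.List.pyGetD (PySem.List.pyGetD mP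
        (if (k : Int) + i1 < (matrix.length : Int) then (k : Int) + i1 else (k : Int) + i1 - (matrix.length : Int)) []) i1 0
        = pvCell matrix (pvRow matrix.length k i1) (pvCol matrix.length i1) := by
      rw [cell_get mP matrix.length hlen hrows' hn k (by omega) i1 h1a h1b]
      apply huntouched _ _ (pvRow_lt _ hn k i1) (pvCol_lt _ hn i1)
      by_cases hcc : pvCol matrix.length i1 = pvCol matrix.length t
      · right
        intro j hj habs
        have h1 : pvRow matrix.length k i1 = pvRow matrix.length k t := pvRow_congr _ _ _ _ hcc
        have := pvRow_inj matrix.length hn t j k (by omega) (by omega) (habs.trans h1)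
        omega
      · left
        exact hcc
    have hget2 : PySem.List.pyGetD (PySem.List.pyGetD mP
        (if (k : Int) + i2 < (matrix.length : Int) then (k : Int) + i2 else (k : Int) + i2 - (matrix.length : Int)) []) i2 0
        = pvCell matrix (pvRow matrix.length k i2) (pvCol matrix.length i2) := by
      rw [cell_get mP matrix.length hlen hrows' hn k (by omega) i2 h2a h2b]
      apply huntouched _ _ (pvRow_lt _ hn k i2) (pvCol_lt _ hn i2)
      by_cases hcc : pvCol matrix.length i2 = pvCol matrix.length t
      · right
        intro j hj habs
        have h1 : pvRow matrix.length k i2 = pvRow matrix.length k t := pvRow_congr _ _ _ _ hcc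
        have := pvRow_inj matrix.length hn t j k (by omega) (by omega) (habs.trans h1)
        omega
      · left
        exact hcc
    have hbv : (if pvCell matrix (pvRow matrix.length k i1) (pvCol matrix.length i1) = 0 then (1 : Int)
          else pvCell matrix (pvRow matrix.length k i2) (pvCol matrix.length i2))
        = pvBit matrix i1 i2 k := rfl
    refine ⟨?_, ?_, ?_, ?_⟩
    · rw [hget1, hget2, hbv]
      exact cell_set mP matrix.length hlen hrows' hn k (by omega) t h3a h3b _
    · exact (shape_set mP matrix.length hlen hrows' _ _ (pvRow_lt _ hn k t) _).1
    · exact (shape_set mP matrix.length hlen hrows' _ _ (pvRow_lt _ hn k t) _).2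
    · intro r c hr hc hcond
      have hne : r ≠ pvRow matrix.length k t ∨ c ≠ pvCol matrix.length t := by
        rcases hcond with h | h
        · right; exact h
        · left; exact fun hre => (h k (by omega)) hre.symm
      rw [pvCell_write_ne mP _ _ _ r c hne]
      refine huntouched r c hr hc ?_
      rcases hcond with h | h
      · left; exact h
      · right; exact fun j hj => h j (by omega)

lemma pvB_norm (matrix : List (List Int)) (i1 i2 t : Int)
    (hpre : Pre_perform_negation_disjunction_and_paste matrix i1 i2 t) :
    perform_negation_disjunction_and_paste_alt matrix i1 i2 t = pvPaste matrix (pvBit matrix i1 i2) t := by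
  obtain ⟨hsq, hdom⟩ := hpre
  rcases hdom with hnil | ⟨h1a, h1b, h2a, h2b, h3a, h3b⟩
  · subst hnil
    rfl
  · have hn : 0 < matrix.length := by omega
    exact (pvB_stage matrix i1 i2 t hsq hn h1a h1b h2a h2b h3a h3b matrix.length le_rfl).1

-- ===== VERDICT (by name: the statement is the Claim_ definition above) =====
theorem perform_negation_disjunction_and_paste_spec : Claim_equal_perform_negation_disjunction_and_paste := by
  intro matrix i1 i2 t _ hpre
  unfold Spec_perform_negation_disjunction_and_paste
  rw [pvA_norm matrix i1 i2 t hpre, pvB_norm matrix i1 i2 t hpre]
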